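-- pv_equiv track=rewrite | github.com/farjadfazli/code-challenges | binarysearch_recursive-index.py | solve
-- ===== SOURCE A (Python) =====
-- def solve(nums, k):
--     result = []
--     while k < len(nums):
--         result.append(nums[k])
--         k = nums[k]
--         if len(result) > len(nums):
--             return -1
--     return len(result)
-- ===== SOURCE B (Python) =====
-- def solve(nums, k):
--     # Floyd's tortoise-and-hare: O(1) extra space, no visited list/counter.
--     n = len(nums)
--     slow = fast = k
--     while fast < n:
--         fast = nums[fast]
--         if fast >= n:
--             break
--         fast = nums[fast]
--         slow = nums[slow]
--         if slow == fast:
--             return -1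
--     # The chain escapes; walk it once more to count the jumps.
--     count = 0
--     while k < n:
--         k = nums[k]
--         count += 1
--     return count
-- ===== Notes on version B (the rewrite author's own statement) =====
-- stated objective: alternative
-- what changed: Replaces A's result-list accumulator with length-threshold cycle detection by Floyd's tortoise-and-hare: a two-pointer phase detects a cycle in O(1) extra space, and on escape a second pass counts the jumps.
import Mathlib
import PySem

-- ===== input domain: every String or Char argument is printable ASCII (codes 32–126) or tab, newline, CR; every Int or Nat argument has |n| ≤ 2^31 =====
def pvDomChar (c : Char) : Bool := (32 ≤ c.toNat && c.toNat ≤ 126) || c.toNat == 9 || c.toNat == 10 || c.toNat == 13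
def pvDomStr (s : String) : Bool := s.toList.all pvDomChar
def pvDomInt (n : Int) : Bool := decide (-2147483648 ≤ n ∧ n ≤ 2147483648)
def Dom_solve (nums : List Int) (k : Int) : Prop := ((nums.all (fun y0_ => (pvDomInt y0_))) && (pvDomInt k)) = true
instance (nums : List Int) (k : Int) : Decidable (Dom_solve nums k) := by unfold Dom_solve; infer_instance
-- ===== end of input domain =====

-- B replaces A's result-list accumulator plus length-threshold cycle detection by
-- Floyd's tortoise-and-hare cycle detection (O(1) extra space) followed by a counting pass.


-- ===== PORT A =====
-- while k < len(nums): result.append(nums[k]); k = nums[k]; if len(result) > len(nums): return -1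
-- fuel = len(nums)+1 bounds the loop: the threshold returns -1 before a (len+1)-th recursion.
def solveGo (nums : List Int) (k : Int) (result : List Int) (fuel : Nat) : Int :=
  match fuel with
  | 0 => 0                          -- fuel exhaustion (unreachable: the threshold fires first)
  | fuel' + 1 =>
    if k < (nums.length : Int) then
      match PySem.List.pyGet? nums k with
      | none => 0                   -- Python raises IndexError here (outside Pre_solve)
      | some v =>
        let result' := result ++ [v]
        if (nums.length : Int) < (result'.length : Int) then -1
        else solveGo nums v result' fuel'
    else (result.length : Int)

def solve (nums : List Int) (k : Int) : Int := solveGo nums k [] (nums.length + 1)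

-- ===== PORT B =====
-- count = 0; while k < n: k = nums[k]; count += 1; return count
-- fuel = len(nums)+1 suffices: an escaping chain never revisits a cell, so it has ≤ len(nums) jumps.
def countGo (nums : List Int) (k : Int) (count : Int) (fuel : Nat) : Int :=
  match fuel with
  | 0 => 0                          -- fuel exhaustion (unreachable inside Pre_solve)
  | fuel' + 1 =>
    if k < (nums.length : Int) then
      match PySem.List.pyGet? nums k with
      | none => 0                   -- Python raises IndexError here (outside Pre_solve)
      | some v => countGo nums v (count + 1) fuel'
    else count

-- slow = fast = k; while fast < n: fast = nums[fast]; if fast >= n: break;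
--   fast = nums[fast]; slow = nums[slow]; if slow == fast: return -1
-- then the counting loop on the original k.  fuel = 2*len(nums)+2 suffices: the pointers
-- meet (or the hare escapes) within 2*len(nums) iterations.
def floydGo (nums : List Int) (k0 slow fast : Int) (fuel : Nat) : Int :=
  match fuel with
  | 0 => 0                          -- fuel exhaustion (unreachable inside Pre_solve)
  | fuel' + 1 =>
    if fast < (nums.length : Int) then
      match PySem.List.pyGet? nums fast with
      | none => 0                   -- IndexError (outside Pre_solve)
      | some f1 =>
        if (nums.length : Int) ≤ f1 then countGo nums k0 0 (nums.length + 1)   -- break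
        else
          match PySem.List.pyGet? nums f1 with
          | none => 0               -- IndexError (outside Pre_solve)
          | some f2 =>
            match PySem.List.pyGet? nums slow with
            | none => 0             -- IndexError (outside Pre_solve)
            | some s1 =>
              if s1 = f2 then -1
              else floydGo nums k0 s1 f2 fuel'
    else countGo nums k0 0 (nums.length + 1)

def solve_alt (nums : List Int) (k : Int) : Int :=
  floydGo nums k k k (2 * nums.length + 2)

-- ===== PRECONDITION & SPEC =====
-- One step of the pointer map, made total: indices ≥ len (exits) are absorbed, and an
-- access that would raise is sent to the absorbing bad value -len-1.
def stepF (nums : List Int) (j : Int) : Int :=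
  if j < (nums.length : Int) then PySem.List.pyGetD nums j (-(nums.length : Int) - 1) else j

-- Pre_solve excludes EXACTLY the inputs on which A raises IndexError: those whose pointer
-- chain reaches an index below -len(nums) within its first len(nums)+1 positions (A performs
-- at most len(nums)+1 accesses before returning).  On every input where A returns, Pre_solve holds.
def Pre_solve (nums : List Int) (k : Int) : Prop :=
  ∀ m < nums.length + 1, -(nums.length : Int) ≤ (stepF nums)^[m] k
instance (nums : List Int) (k : Int) : Decidable (Pre_solve nums k) := by
  unfold Pre_solve; infer_instance

def pvWitness_solve : List Int × Int := ([1, 3, -1, 0], 0)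

def Spec_solve (nums : List Int) (k : Int) (out : Int) : Prop := out = solve_alt nums k
instance (nums : List Int) (k : Int) (out : Int) : Decidable (Spec_solve nums k out) := by
  unfold Spec_solve; infer_instance

-- ===== CLAIM =====
def Claim_equal_solve : Prop :=
  ∀ (nums : List Int) (k : Int), Dom_solve nums k → Pre_solve nums k → Spec_solve nums k (solve nums k)

-- ===== LEMMAS AND PROOFS =====

-- the pointer chain: position m of the walk starting at k
def chain (nums : List Int) (k : Int) (m : Nat) : Int := (stepF nums)^[m] k

theorem chain_zero (nums : List Int) (k : Int) : chain nums k 0 = k := rfl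

theorem chain_succ (nums : List Int) (k : Int) (m : Nat) :
    chain nums k (m + 1) = stepF nums (chain nums k m) := by
  unfold chain
  exact Function.iterate_succ_apply' _ _ _

theorem chain_add (nums : List Int) (k : Int) (a t : Nat) :
    chain nums k (a + t) = (stepF nums)^[t] (chain nums k a) := by
  unfold chain
  rw [Nat.add_comm, Function.iterate_add_apply]

theorem pyGetD_eq_pyGet? (xs : List Int) (i d : Int) :
    PySem.List.pyGetD xs i d = (PySem.List.pyGet? xs i).getD d := by
  simp [PySem.List.pyGetD, PySem.List.pyGet?]

-- in range ⇒ the real access happens and yields the next chain value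
theorem chain_get (nums : List Int) (k : Int) (m : Nat)
    (h1 : -(nums.length : Int) ≤ chain nums k m) (h2 : chain nums k m < (nums.length : Int)) :
    PySem.List.pyGet? nums (chain nums k m) = some (chain nums k (m + 1)) := by
  rcases hg : PySem.List.pyGet? nums (chain nums k m) with _ | v
  · rw [PySem.List.pyGet?_eq_none_iff] at hg
    exact absurd ⟨h1, h2⟩ hg
  · rw [chain_succ]
    unfold stepF
    rw [if_pos h2, pyGetD_eq_pyGet?, hg]
    rfl

-- a value repeat makes the whole tail of the chain recur inside the window [a, b)
theorem chain_window (nums : List Int) (k : Int) (a b : Nat)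
    (hab : chain nums k a = chain nums k b) (hlt : a < b) :
    ∀ m, a ≤ m → ∃ m', a ≤ m' ∧ m' < b ∧ chain nums k m = chain nums k m' := by
  intro m
  induction m using Nat.strong_induction_on with
  | _ m ih =>
    intro hm
    by_cases hb : m < b
    · exact ⟨m, hm, hb, rfl⟩
    · have hshift : chain nums k m = chain nums k (m - (b - a)) := by
        have h0 : chain nums k (a + (m - b)) = chain nums k (b + (m - b)) := by
          rw [chain_add, chain_add, hab]
        have e1 : b + (m - b) = m := by omega
        have e2 : a + (m - b) = m - (b - a) := by omega
        rw [e1, e2] at h0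
        exact h0.symm
      obtain ⟨m', h1', h2', h3'⟩ := ih (m - (b - a)) (by omega) (by omega)
      exact ⟨m', h1', h2', hshift.trans h3'⟩

-- periodicity: the repeat propagates forward with period b - a
theorem chain_period (nums : List Int) (k : Int) (a b : Nat)
    (hab : chain nums k a = chain nums k b) (hlt : a < b) :
    ∀ t, a ≤ t → chain nums k (t + (b - a)) = chain nums k t := by
  intro t ht
  have h0 : chain nums k (a + (t - a)) = chain nums k (b + (t - a)) := by
    rw [chain_add, chain_add, hab]
  have e1 : a + (t - a) = t := by omega
  have e2 : b + (t - a) = t + (b - a) := by omega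
  rw [e1, e2] at h0
  exact h0.symm

theorem chain_period_mul (nums : List Int) (k : Int) (a b : Nat)
    (hab : chain nums k a = chain nums k b) (hlt : a < b) :
    ∀ q t, a ≤ t → chain nums k (t + q * (b - a)) = chain nums k t := by
  intro q
  induction q with
  | zero => intro t ht; simp
  | succ q ih =>
    intro t ht
    have e : t + (q + 1) * (b - a) = (t + q * (b - a)) + (b - a) := by ring
    rw [e, chain_period nums k a b hab hlt _ (by omega), ih t ht]

-- negative-index normalisation for list access
theorem pyGetD_shift (nums : List Int) (a d : Int)
    (h1 : -(nums.length : Int) ≤ a) (h2 : a < 0) :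
    PySem.List.pyGetD nums a d = PySem.List.pyGetD nums (a + nums.length) d := by
  have hk1 : 0 < (-a).toNat := by omega
  have hk2 : (-a).toNat ≤ nums.length := by omega
  have e : a = -(((-a).toNat : Int)) := by omega
  rw [e, PySem.List.pyGetD_neg_natCast _ _ _ hk1 hk2]
  have e2 : -(((-a).toNat : Int)) + (nums.length : Int) = ((nums.length - (-a).toNat : Nat) : Int) := by
    omega
  rw [e2, PySem.List.pyGetD_natCast]
  have hlt : nums.length - (-a).toNat < nums.length := by omega
  rw [List.getD_eq_getElem _ _ hlt]

-- two in-range indices naming the same cell step identically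
theorem stepF_cell (nums : List Int) (a b : Int)
    (ha1 : -(nums.length : Int) ≤ a) (ha2 : a < (nums.length : Int))
    (hb1 : -(nums.length : Int) ≤ b) (hb2 : b < (nums.length : Int))
    (hcell : (if a < 0 then a + nums.length else a) = (if b < 0 then b + nums.length else b)) :
    stepF nums a = stepF nums b := by
  unfold stepF
  rw [if_pos ha2, if_pos hb2]
  by_cases hna : a < 0 <;> by_cases hnb : b < 0
  · rw [pyGetD_shift nums a _ ha1 hna, pyGetD_shift nums b _ hb1 hnb]
    rw [if_pos hna, if_pos hnb] at hcell
    rw [hcell]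
  · rw [pyGetD_shift nums a _ ha1 hna]
    rw [if_pos hna, if_neg hnb] at hcell
    rw [hcell]
  · rw [pyGetD_shift nums b _ hb1 hnb]
    rw [if_neg hna, if_pos hnb] at hcell
    rw [hcell]
  · rw [if_neg hna, if_neg hnb] at hcell
    rw [hcell]

-- ===== the escaping (finite-walk) case =====

-- A returns the number of jumps s (the first chain position with value ≥ len)
theorem solveGo_fin (nums : List Int) (k : Int) (s : Nat)
    (hPre : Pre_solve nums k) (hsn : s ≤ nums.length)
    (hs1 : (nums.length : Int) ≤ chain nums k s)
    (hs2 : ∀ m, m < s → chain nums k m < (nums.length : Int)) :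
    ∀ fuel m (result : List Int), result.length = m → m + fuel = nums.length + 1 → m ≤ s →
      solveGo nums (chain nums k m) result fuel = (s : Int) := by
  intro fuel
  induction fuel with
  | zero => intro m result _ h2 h3; omega
  | succ f ih =>
    intro m result h1 h2 h3
    by_cases hms : m = s
    · subst hms
      rw [solveGo, if_neg (not_lt.mpr hs1), h1]
    · have hlt : m < s := lt_of_le_of_ne h3 hms
      have hcm : chain nums k m < (nums.length : Int) := hs2 m hlt
      have hge : -(nums.length : Int) ≤ chain nums k m := hPre m (by omega)
      rw [solveGo, if_pos hcm, chain_get nums k m hge hcm]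
      have hth : ¬ ((nums.length : Int) < (((result ++ [chain nums k (m + 1)]).length : Nat) : Int)) := by
        simp [h1]; omega
      show (if (nums.length : Int) < (((result ++ [chain nums k (m + 1)]).length : Nat) : Int)
            then (-1 : Int) else solveGo nums (chain nums k (m + 1)) (result ++ [chain nums k (m + 1)]) f) = (s : Int)
      rw [if_neg hth]
      exact ih (m + 1) _ (by simp [h1]) (by omega) (by omega)

-- B's counting loop returns the remaining number of jumps
theorem countGo_fin (nums : List Int) (k : Int) (s : Nat)
    (hPre : Pre_solve nums k) (hsn : s ≤ nums.length)
    (hs1 : (nums.length : Int) ≤ chain nums k s)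
    (hs2 : ∀ m, m < s → chain nums k m < (nums.length : Int)) :
    ∀ fuel m (count : Int), m ≤ s → s - m < fuel →
      countGo nums (chain nums k m) count fuel = count + ((s - m : Nat) : Int) := by
  intro fuel
  induction fuel with
  | zero => intro m count _ h; omega
  | succ f ih =>
    intro m count h1 h2
    by_cases hms : m = s
    · subst hms
      rw [countGo, if_neg (not_lt.mpr hs1)]
      simp
    · have hlt : m < s := lt_of_le_of_ne h1 hms
      have hcm : chain nums k m < (nums.length : Int) := hs2 m hlt
      have hge : -(nums.length : Int) ≤ chain nums k m := hPre m (by omega)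
      rw [countGo, if_pos hcm, chain_get nums k m hge hcm]
      show countGo nums (chain nums k (m + 1)) (count + 1) f = count + ((s - m : Nat) : Int)
      rw [ih (m + 1) (count + 1) (by omega) (by omega)]
      have e : ((s - m : Nat) : Int) = ((s - (m + 1) : Nat) : Int) + 1 := by omega
      rw [e]; ring

-- Floyd's loop on an escaping chain breaks out and counts
theorem floydGo_fin (nums : List Int) (k : Int) (s : Nat)
    (hPre : Pre_solve nums k) (hsn : s ≤ nums.length)
    (hs1 : (nums.length : Int) ≤ chain nums k s)
    (hs2 : ∀ m, m < s → chain nums k m < (nums.length : Int)) :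
    ∀ fuel i, 2 * i ≤ s → s < 2 * i + 2 * fuel →
      floydGo nums k (chain nums k i) (chain nums k (2 * i)) fuel = (s : Int) := by
  have hcount : countGo nums k 0 (nums.length + 1) = (s : Int) := by
    have h := countGo_fin nums k s hPre hsn hs1 hs2 (nums.length + 1) 0 0 (by omega) (by omega)
    rw [chain_zero] at h
    simpa using h
  intro fuel
  induction fuel with
  | zero => intro i h1 h2; omega
  | succ f ih =>
    intro i h1 h2
    by_cases h2i : 2 * i = s
    · rw [floydGo, h2i, if_neg (not_lt.mpr hs1)]
      exact hcount
    · have h2i' : 2 * i < s := lt_of_le_of_ne h1 h2i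
      have hf : chain nums k (2 * i) < (nums.length : Int) := hs2 _ h2i'
      have hfge : -(nums.length : Int) ≤ chain nums k (2 * i) := hPre _ (by omega)
      rw [floydGo, if_pos hf, chain_get nums k (2 * i) hfge hf]
      show (if (nums.length : Int) ≤ chain nums k (2 * i + 1)
            then countGo nums k 0 (nums.length + 1)
            else match PySem.List.pyGet? nums (chain nums k (2 * i + 1)) with
              | none => 0
              | some f2 =>
                match PySem.List.pyGet? nums (chain nums k i) with
                | none => 0
                | some s1 => if s1 = f2 then -1 else floydGo nums k s1 f2 f) = (s : Int)
      by_cases h2i1 : 2 * i + 1 = s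
      · rw [if_pos (by rw [h2i1]; exact hs1)]
        exact hcount
      · have h2i1' : 2 * i + 1 < s := by omega
        have hf1 : chain nums k (2 * i + 1) < (nums.length : Int) := hs2 _ h2i1'
        have hf1ge : -(nums.length : Int) ≤ chain nums k (2 * i + 1) := hPre _ (by omega)
        rw [if_neg (not_le.mpr hf1), chain_get nums k (2 * i + 1) hf1ge hf1]
        show (match PySem.List.pyGet? nums (chain nums k i) with
              | none => 0
              | some s1 => if s1 = chain nums k (2 * i + 1 + 1) then (-1 : Int)
                           else floydGo nums k s1 (chain nums k (2 * i + 1 + 1)) f) = (s : Int)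
        have hi : i < s := by omega
        have hsge : -(nums.length : Int) ≤ chain nums k i := hPre _ (by omega)
        rw [chain_get nums k i hsge (hs2 _ hi)]
        show (if chain nums k (i + 1) = chain nums k (2 * i + 1 + 1) then (-1 : Int)
              else floydGo nums k (chain nums k (i + 1)) (chain nums k (2 * i + 1 + 1)) f) = (s : Int)
        have hne : chain nums k (i + 1) ≠ chain nums k (2 * i + 1 + 1) := by
          intro heq
          obtain ⟨m', hm1, hm2, hm3⟩ :=
            chain_window nums k (i + 1) (2 * i + 1 + 1) heq (by omega) s (by omega)
          have hmlt : chain nums k m' < (nums.length : Int) := hs2 m' (by omega)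
          rw [← hm3] at hmlt
          omega
        rw [if_neg hne, show 2 * i + 1 + 1 = 2 * (i + 1) from by ring]
        exact ih (i + 1) (by omega) (by omega)

-- ===== the non-escaping (cycling) case =====

-- pigeonhole on cells: two chain positions within [0, len] step identically
theorem cell_repeat (nums : List Int) (k : Int)
    (hPre : Pre_solve nums k)
    (hNoEsc : ∀ m, m ≤ nums.length → chain nums k m < (nums.length : Int)) :
    ∃ a b, 0 < a ∧ a < b ∧ b ≤ nums.length + 1 ∧ chain nums k a = chain nums k b := by
  have hn : 0 < nums.length := by
    by_contra h
    have h0 : nums.length = 0 := by omega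
    have hA := hNoEsc 0 (by omega)
    have hB0 : -(nums.length : Int) ≤ chain nums k 0 := hPre 0 (by omega)
    omega
  set g : Nat → Int := fun m =>
    if chain nums k m < 0 then chain nums k m + nums.length else chain nums k m with hg
  have hgb : ∀ m, m ≤ nums.length → 0 ≤ g m ∧ g m < (nums.length : Int) := by
    intro m hm
    have h1 : -(nums.length : Int) ≤ chain nums k m := hPre m (by omega)
    have h2 := hNoEsc m hm
    simp only [hg]
    split_ifs with h <;> omega
  have key : ∀ x y : Nat, x ≤ nums.length → y ≤ nums.length → (g x).toNat = (g y).toNat →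
      chain nums k (x + 1) = chain nums k (y + 1) := by
    intro x y hx hy hxy
    rw [chain_succ, chain_succ]
    have hbx := hgb x hx
    have hby := hgb y hy
    have hgeq : g x = g y := by omega
    exact stepF_cell nums _ _ (hPre x (by omega)) (hNoEsc x hx)
      (hPre y (by omega)) (hNoEsc y hy) hgeq
  have hmap : ∀ m ∈ Finset.range (nums.length + 1),
      (g m).toNat ∈ Finset.range nums.length := by
    intro m hm
    rw [Finset.mem_range] at hm ⊢
    have := hgb m (by omega)
    omega
  obtain ⟨i, hi, j, hj, hij, hgij⟩ :=
    Finset.exists_ne_map_eq_of_card_lt_of_maps_to (by simp) hmap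
  rw [Finset.mem_range] at hi hj
  rcases lt_or_gt_of_ne hij with hlt | hlt
  · exact ⟨i + 1, j + 1, by omega, by omega, by omega,
      key i j (by omega) (by omega) hgij⟩
  · exact ⟨j + 1, i + 1, by omega, by omega, by omega,
      key j i (by omega) (by omega) hgij.symm⟩

-- every chain position stays strictly inside the index range
theorem chain_bounds_inf (nums : List Int) (k : Int)
    (hPre : Pre_solve nums k)
    (hNoEsc : ∀ m, m ≤ nums.length → chain nums k m < (nums.length : Int)) :
    ∀ m, -(nums.length : Int) ≤ chain nums k m ∧ chain nums k m < (nums.length : Int) := by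
  obtain ⟨a, b, ha, hab, hb, heq⟩ := cell_repeat nums k hPre hNoEsc
  intro m
  by_cases hm : m ≤ nums.length
  · exact ⟨hPre m (by omega), hNoEsc m hm⟩
  · obtain ⟨m', h1, h2, h3⟩ := chain_window nums k a b heq hab m (by omega)
    rw [h3]
    exact ⟨hPre m' (by omega), hNoEsc m' (by omega)⟩

-- A hits the length threshold and returns -1
theorem solveGo_inf (nums : List Int) (k : Int)
    (hB : ∀ m, -(nums.length : Int) ≤ chain nums k m ∧ chain nums k m < (nums.length : Int)) :
    ∀ fuel m (result : List Int), result.length = m → m + fuel = nums.length + 1 → m ≤ nums.length →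
      solveGo nums (chain nums k m) result fuel = -1 := by
  intro fuel
  induction fuel with
  | zero => intro m result _ h2 h3; omega
  | succ f ih =>
    intro m result h1 h2 h3
    obtain ⟨hge, hlt⟩ := hB m
    rw [solveGo, if_pos hlt, chain_get nums k m hge hlt]
    show (if (nums.length : Int) < (((result ++ [chain nums k (m + 1)]).length : Nat) : Int)
          then (-1 : Int) else solveGo nums (chain nums k (m + 1)) (result ++ [chain nums k (m + 1)]) f) = -1
    by_cases hth : (nums.length : Int) < (((result ++ [chain nums k (m + 1)]).length : Nat) : Int)
    · rw [if_pos hth]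
    · rw [if_neg hth]
      have : m < nums.length := by simp at hth; omega
      exact ih (m + 1) _ (by simp [h1]) (by omega) (by omega)

-- a meeting point for the two pointers exists
theorem meet_exists (nums : List Int) (k : Int) (a b : Nat)
    (ha : 0 < a) (hab : a < b) (hb : b ≤ nums.length + 1)
    (heq : chain nums k a = chain nums k b) :
    ∃ i0, 1 ≤ i0 ∧ i0 ≤ 2 * nums.length ∧ chain nums k (2 * i0) = chain nums k i0 := by
  set p := b - a with hp
  have hp0 : 0 < p := by omega
  have hdm := Nat.div_add_mod a p
  have hmod := Nat.mod_lt a hp0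
  have hsplit : p * (a / p + 1) = p * (a / p) + p := by ring
  have hub : p * (a / p) ≤ a := by
    rw [mul_comm]
    exact Nat.div_mul_le_self a p
  refine ⟨p * (a / p + 1), by omega, by omega, ?_⟩
  have hge : a ≤ p * (a / p + 1) := by omega
  rw [show 2 * (p * (a / p + 1)) = p * (a / p + 1) + (a / p + 1) * p from by ring]
  exact chain_period_mul nums k a b heq hab (a / p + 1) _ hge

-- Floyd's loop detects the cycle
theorem floydGo_inf (nums : List Int) (k : Int) (i0 : Nat)
    (hB : ∀ m, -(nums.length : Int) ≤ chain nums k m ∧ chain nums k m < (nums.length : Int))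
    (hMeet : chain nums k (2 * i0) = chain nums k i0) :
    ∀ fuel t, t < i0 → i0 - t ≤ fuel →
      floydGo nums k (chain nums k t) (chain nums k (2 * t)) fuel = -1 := by
  intro fuel
  induction fuel with
  | zero => intro t h1 h2; omega
  | succ f ih =>
    intro t h1 h2
    obtain ⟨hge, hlt⟩ := hB (2 * t)
    rw [floydGo, if_pos hlt, chain_get nums k (2 * t) hge hlt]
    obtain ⟨hge1, hlt1⟩ := hB (2 * t + 1)
    show (if (nums.length : Int) ≤ chain nums k (2 * t + 1)
          then countGo nums k 0 (nums.length + 1)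
          else match PySem.List.pyGet? nums (chain nums k (2 * t + 1)) with
            | none => 0
            | some f2 =>
              match PySem.List.pyGet? nums (chain nums k t) with
              | none => 0
              | some s1 => if s1 = f2 then -1 else floydGo nums k s1 f2 f) = -1
    rw [if_neg (not_le.mpr hlt1), chain_get nums k (2 * t + 1) hge1 hlt1]
    obtain ⟨hges, hlts⟩ := hB t
    show (match PySem.List.pyGet? nums (chain nums k t) with
          | none => 0
          | some s1 => if s1 = chain nums k (2 * t + 1 + 1) then (-1 : Int)
                       else floydGo nums k s1 (chain nums k (2 * t + 1 + 1)) f) = -1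
    rw [chain_get nums k t hges hlts]
    show (if chain nums k (t + 1) = chain nums k (2 * t + 1 + 1) then (-1 : Int)
          else floydGo nums k (chain nums k (t + 1)) (chain nums k (2 * t + 1 + 1)) f) = -1
    by_cases hm : chain nums k (t + 1) = chain nums k (2 * t + 1 + 1)
    · rw [if_pos hm]
    · rw [if_neg hm]
      have ht1 : t + 1 < i0 := by
        rcases Nat.lt_or_ge (t + 1) i0 with h | h
        · exact h
        · exfalso
          have he : t + 1 = i0 := by omega
          apply hm
          rw [he, show 2 * t + 1 + 1 = 2 * i0 from by omega, hMeet]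
      rw [show 2 * t + 1 + 1 = 2 * (t + 1) from by ring]
      exact ih (t + 1) ht1 (by omega)

theorem solve_spec_aux : ∀ (nums : List Int) (k : Int),
    Pre_solve nums k → solve nums k = solve_alt nums k := by
  intro nums k hPre
  by_cases hEsc : ∃ m, m ≤ nums.length ∧ (nums.length : Int) ≤ chain nums k m
  · -- the chain escapes: both sides return the jump count s
    obtain ⟨w, hw1, hw2⟩ := hEsc
    have hex : ∃ m, (nums.length : Int) ≤ chain nums k m := ⟨w, hw2⟩
    set s := Nat.find hex with hs
    have hs1 : (nums.length : Int) ≤ chain nums k s := Nat.find_spec hex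
    have hs2 : ∀ m, m < s → chain nums k m < (nums.length : Int) := by
      intro m hm
      have := Nat.find_min hex hm
      omega
    have hsn : s ≤ nums.length := (Nat.find_min' hex hw2).trans hw1
    unfold solve solve_alt
    have hA := solveGo_fin nums k s hPre hsn hs1 hs2 (nums.length + 1) 0 [] rfl (by omega) (by omega)
    have hBf := floydGo_fin nums k s hPre hsn hs1 hs2 (2 * nums.length + 2) 0 (by omega) (by omega)
    rw [chain_zero] at hA
    rw [show 2 * 0 = 0 from rfl, chain_zero] at hBf
    rw [hA, hBf]
  · -- the chain cycles: both sides return -1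
    have hNoEsc : ∀ m, m ≤ nums.length → chain nums k m < (nums.length : Int) := by
      intro m hm
      by_contra h
      exact hEsc ⟨m, hm, not_lt.mp h⟩
    have hB := chain_bounds_inf nums k hPre hNoEsc
    obtain ⟨a, b, ha, hab, hb, heq⟩ := cell_repeat nums k hPre hNoEsc
    obtain ⟨i0, hi1, hi2, hMeet⟩ := meet_exists nums k a b ha hab hb heq
    unfold solve solve_alt
    have hA := solveGo_inf nums k hB (nums.length + 1) 0 [] rfl (by omega) (by omega)
    have hBf := floydGo_inf nums k i0 hB hMeet (2 * nums.length + 2) 0 (by omega) (by omega)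
    rw [chain_zero] at hA
    rw [show 2 * 0 = 0 from rfl, chain_zero] at hBf
    rw [hA, hBf]

-- ===== VERDICT =====
theorem solve_spec : Claim_equal_solve := by
  intro nums k _ hPre
  exact solve_spec_aux nums k hPre
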